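-- pv_equiv track=rewrite | github.com/snakesch/SDrecall | gt_read_clustering_filter.py | count_true_segments
-- ===== SOURCE A (Python) =====
-- def count_true_segments(arr):
--     consecutive_count = 0
--     isolated_count = 0
--
--     i = 0
--     while i < len(arr):
--         if arr[i]:
--             if i + 1 < len(arr) and arr[i + 1]:
--                 # Found consecutive True values
--                 start = i
--                 while i < len(arr) and arr[i]:
--                     i += 1
--                 consecutive_count += 1
--             else:
--                 # Found an isolated True value
--                 isolated_count += 1
--                 i += 1
--         else:
--             i += 1
--
--     return consecutive_count, isolated_count
-- ===== SOURCE B (Python) =====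
-- from itertools import groupby
--
--
-- def count_true_segments(arr):
--     consecutive_count = 0
--     isolated_count = 0
--     for key, grp in groupby(arr, key=bool):
--         if key:
--             n = sum(1 for _ in grp)
--             if n >= 2:
--                 consecutive_count += 1
--             else:
--                 isolated_count += 1
--     return consecutive_count, isolated_count
-- ===== Notes on version B (the rewrite author's own statement) =====
-- stated objective: idiomatic
-- what changed: Replaces the index-based while loop with lookahead and an inner skip loop by itertools.groupby over truthiness: each maximal True run is classified by its length (>=2 consecutive, else isolated).
import Mathlib
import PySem

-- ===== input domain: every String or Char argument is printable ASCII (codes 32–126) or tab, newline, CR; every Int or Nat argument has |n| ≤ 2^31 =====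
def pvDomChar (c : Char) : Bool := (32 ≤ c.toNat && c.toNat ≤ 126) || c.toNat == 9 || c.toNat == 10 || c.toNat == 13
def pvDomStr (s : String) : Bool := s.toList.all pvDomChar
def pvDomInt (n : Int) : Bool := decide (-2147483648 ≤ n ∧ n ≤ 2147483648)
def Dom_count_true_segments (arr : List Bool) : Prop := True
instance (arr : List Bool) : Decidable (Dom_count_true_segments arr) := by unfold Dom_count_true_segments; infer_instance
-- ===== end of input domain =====

-- B replaces A's index-scan-with-lookahead-and-inner-skip-loop by grouping the array
-- into maximal runs of equal truthiness and classifying each True run by its length (idiomatic).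

-- ===== PORT A =====
-- inner `while i < len(arr) and arr[i]: i += 1`
def ctsSkip (arr : List Bool) (i : Nat) : Nat :=
  if i < arr.length ∧ arr.getD i false then ctsSkip arr (i + 1) else i
termination_by arr.length - i
decreasing_by omega

theorem ctsSkip_le (arr : List Bool) (i : Nat) : i ≤ ctsSkip arr i := by
  fun_induction ctsSkip arr i with
  | case1 i h ih => omega
  | case2 i h => omega

-- outer `while i < len(arr): …`
def ctsLoop (arr : List Bool) (i : Nat) (cc ic : Int) : Int × Int :=
  if h : i < arr.length then
    if arr.getD i false then
      if i + 1 < arr.length ∧ arr.getD (i + 1) false then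
        ctsLoop arr (ctsSkip arr i) (cc + 1) ic
      else
        ctsLoop arr (i + 1) cc (ic + 1)
    else
      ctsLoop arr (i + 1) cc ic
  else (cc, ic)
termination_by arr.length - i
decreasing_by
  · have h1 : ctsSkip arr i = ctsSkip arr (i + 1) := by
      rw [ctsSkip]; simp_all
    have := ctsSkip_le arr (i + 1)
    omega
  · omega
  · omega

def count_true_segments (arr : List Bool) : Int × Int :=
  ctsLoop arr 0 0 0

-- ===== PORT B =====
-- groupby truthiness: peel one maximal run of elements equal to the head at a time;
-- a True run of length ≥ 2 is consecutive, of length 1 isolated.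
def ctsGroups (l : List Bool) : Int × Int :=
  match hl : l with
  | [] => (0, 0)
  | x :: xs =>
    let n := 1 + (xs.takeWhile (· == x)).length
    let rest := xs.dropWhile (· == x)
    let p := ctsGroups rest
    if x then
      (if n ≥ 2 then (p.1 + 1, p.2) else (p.1, p.2 + 1))
    else p
termination_by l.length
decreasing_by
  have := List.length_dropWhile_le (p := (· == x)) (l := xs)
  simp; omega

def count_true_segments_alt (arr : List Bool) : Int × Int :=
  ctsGroups arr

-- ===== PRECONDITION & SPEC =====
def Spec_count_true_segments (arr : List Bool) (out : Int × Int) : Prop := out = count_true_segments_alt arr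
instance (arr : List Bool) (out : Int × Int) : Decidable (Spec_count_true_segments arr out) := by unfold Spec_count_true_segments; infer_instance

-- ===== CLAIM (what is proved, stated in full; the proofs are below) =====
def Claim_equal_count_true_segments : Prop := ∀ (arr : List Bool), Dom_count_true_segments arr → Spec_count_true_segments arr (count_true_segments arr)

-- ===== LEMMAS AND PROOFS =====

theorem ctsGroups_false_cons (xs : List Bool) :
    ctsGroups (false :: xs) = ctsGroups xs := by
  rw [ctsGroups]
  cases xs with
  | nil => simp [ctsGroups]
  | cons y ys =>
    cases y with
    | true => simp
    | false =>
      simp only [Bool.false_eq_true, if_false, List.dropWhile]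
      conv_rhs => rw [ctsGroups]
      simp

theorem ctsSkip_drop (arr : List Bool) (i : Nat) :
    arr.drop (ctsSkip arr i) = (arr.drop i).dropWhile (· == true) := by
  fun_induction ctsSkip arr i with
  | case1 i h ih =>
    obtain ⟨hlt, htrue⟩ := h
    rw [ih, List.drop_eq_getElem_cons hlt]
    have : arr[i] = true := by
      have := List.getD_eq_getElem arr false hlt; rw [← this]; exact htrue
    rw [this]
    simp [List.dropWhile]
  | case2 i h =>
    by_cases hlt : i < arr.length
    · have hfalse : arr.getD i false = false := by
        cases hb : arr.getD i false
        · rfl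
        · exact absurd ⟨hlt, hb⟩ h
      rw [List.drop_eq_getElem_cons hlt]
      have : arr[i] = false := by
        have := List.getD_eq_getElem arr false hlt; rw [← this]; exact hfalse
      rw [this]
      simp [List.dropWhile]
    · have : arr.drop i = [] := List.drop_eq_nil_of_le (by omega)
      rw [this]; rfl

theorem ctsLoop_eq (arr : List Bool) (i : Nat) (cc ic : Int) :
    ctsLoop arr i cc ic =
      (cc + (ctsGroups (arr.drop i)).1, ic + (ctsGroups (arr.drop i)).2) := by
  fun_induction ctsLoop arr i cc ic with
  | case1 i cc ic hlt htrue hnext ih =>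
    -- consecutive run
    rw [ih]
    have hdrop : arr.drop i = arr[i] :: arr.drop (i + 1) := List.drop_eq_getElem_cons hlt
    have hgi : arr[i] = true := by
      have := List.getD_eq_getElem arr false hlt; rw [← this]; exact htrue
    obtain ⟨hlt1, htrue1⟩ := hnext
    have hdrop1 : arr.drop (i + 1) = arr[i+1] :: arr.drop (i + 2) :=
      List.drop_eq_getElem_cons hlt1
    have hgi1 : arr[i+1] = true := by
      have := List.getD_eq_getElem arr false hlt1; rw [← this]; exact htrue1
    have hskip : arr.drop (ctsSkip arr i) = (arr.drop i).dropWhile (· == true) :=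
      ctsSkip_drop arr i
    rw [hdrop, hgi] at hskip ⊢
    rw [ctsGroups]
    have hrun : (arr.drop (i + 1)).takeWhile (· == true) =
        true :: (arr.drop (i + 2)).takeWhile (· == true) := by
      rw [hdrop1, hgi1]; simp [List.takeWhile]
    simp only [List.dropWhile] at hskip
    simp only [hrun, hskip, List.length_cons]
    rw [Prod.ext_iff]
    constructor <;> simp <;> split <;> omega
  | case2 i cc ic hlt htrue hnext ih =>
    -- isolated True
    rw [ih]
    have hdrop : arr.drop i = arr[i] :: arr.drop (i + 1) := List.drop_eq_getElem_cons hlt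
    have hgi : arr[i] = true := by
      have := List.getD_eq_getElem arr false hlt; rw [← this]; exact htrue
    rw [hdrop, hgi]
    rw [ctsGroups]
    have hrun : (arr.drop (i + 1)).takeWhile (· == true) = [] ∧
        (arr.drop (i + 1)).dropWhile (· == true) = arr.drop (i + 1) := by
      by_cases hlt1 : i + 1 < arr.length
      · have hdrop1 : arr.drop (i + 1) = arr[i+1] :: arr.drop (i + 2) :=
          List.drop_eq_getElem_cons hlt1
        have hgi1 : arr[i+1] = false := by
          cases hb : arr.getD (i + 1) false
          · have := List.getD_eq_getElem arr false hlt1; rw [← this]; exact hb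
          · exact absurd ⟨hlt1, hb⟩ hnext
        rw [hdrop1, hgi1]
        simp [List.takeWhile, List.dropWhile]
      · have : arr.drop (i + 1) = [] := List.drop_eq_nil_of_le (by omega)
        rw [this]; exact ⟨rfl, rfl⟩
    rw [hrun.1, hrun.2]
    rw [Prod.ext_iff]
    constructor <;> simp <;> omega
  | case3 i cc ic hlt hfalse ih =>
    rw [ih]
    have hdrop : arr.drop i = arr[i] :: arr.drop (i + 1) := List.drop_eq_getElem_cons hlt
    have hgi : arr[i] = false := by
      have := List.getD_eq_getElem arr false hlt
      rw [← this]; simpa using hfalse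
    rw [hdrop, hgi, ctsGroups_false_cons]
  | case4 i cc ic hlt =>
    have : arr.drop i = [] := List.drop_eq_nil_of_le (by omega)
    rw [this]
    show (cc, ic) = _
    rw [ctsGroups]
    simp

-- ===== VERDICT (by name: the statement is the Claim_ definition above) =====
theorem count_true_segments_spec : Claim_equal_count_true_segments := by
  intro arr _
  unfold Spec_count_true_segments count_true_segments count_true_segments_alt
  rw [ctsLoop_eq]
  simp
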